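-- pv_equiv track=rewrite | github.com/renesugar/lark | lark/parsers/lalr_analysis.py | digraph
-- ===== SOURCE A (Python) =====
-- def digraph(nodes, R, G):
--     F = {}
--     stack = []
--     weights = {node:0 for node in nodes}
--
--     # G: set valued function
--     # F: set valued function we are computing (map of input -> output)
--     def traverse(node):
--         stack.append(node)
--         weights[node] = len(stack)
--         F[node] = G[node]
--         for r in R[node]:
--             if weights[r] == 0:
--                 traverse(r)
--             n_x = weights[node]
--             n_y = weights[r]
--             assert(n_x > 0)
--             assert(n_y != 0)
--             if 0 < n_y < n_x:
--                 weights[node] = n_y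
--             F[node].update(F[r])
--
--         if weights[node] == len(stack):
--             f_x = F[node]
--             while True:
--                 top_node = stack.pop()
--                 weights[top_node] = -1
--                 F[top_node] = f_x
--                 if top_node == node:
--                     break
--
--     for x in nodes:
--         if weights[x] == 0:
--             traverse(x)
--     return F
-- ===== SOURCE B (Python) =====
-- def digraph(nodes, R, G):
--     # Iterative (explicit frame stack) version of the digraph fixpoint; same
--     # return value as the recursive original. Note: the original mutates G's
--     # sets in place (F[node] = G[node] aliases them); this version copies and
--     # leaves G untouched -- the equivalence claimed is about the return value.
--     F = {}
--     stack = []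
--     weights = {node: 0 for node in nodes}
--
--     for x in nodes:
--         if weights[x] != 0:
--             continue
--         stack.append(x)
--         weights[x] = len(stack)
--         F[x] = set(G[x])
--         frames = [(x, 0)]
--         while frames:
--             node, i = frames[-1]
--             succs = R[node]
--             if i < len(succs):
--                 r = succs[i]
--                 if weights[r] == 0:
--                     # first encounter: push a child frame; r is re-examined
--                     # (and its result folded in) when we return to this frame
--                     stack.append(r)
--                     weights[r] = len(stack)
--                     F[r] = set(G[r])
--                     frames.append((r, 0))
--                 else:
--                     n_y = weights[r]
--                     if 0 < n_y < weights[node]: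
--                         weights[node] = n_y
--                     F[node] |= F[r]
--                     frames[-1] = (node, i + 1)
--             else:
--                 frames.pop()
--                 if weights[node] == len(stack):
--                     f_x = F[node]
--                     while True:
--                         top_node = stack.pop()
--                         weights[top_node] = -1
--                         F[top_node] = f_x
--                         if top_node == node:
--                             break
--     return F
-- ===== Notes on version B (the rewrite author's own statement) =====
-- stated objective: alternative
-- what changed: The recursive traverse closure is replaced by an iterative depth-first search driven by an explicit stack of (node, successor-index) frames inside a single while loop (resume points recovered by re-checking weights[r] != 0), and F entries are fresh copies of G's sets instead of aliases, so B does not mutate G in place (the equivalence is about the return value).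
import Mathlib
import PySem

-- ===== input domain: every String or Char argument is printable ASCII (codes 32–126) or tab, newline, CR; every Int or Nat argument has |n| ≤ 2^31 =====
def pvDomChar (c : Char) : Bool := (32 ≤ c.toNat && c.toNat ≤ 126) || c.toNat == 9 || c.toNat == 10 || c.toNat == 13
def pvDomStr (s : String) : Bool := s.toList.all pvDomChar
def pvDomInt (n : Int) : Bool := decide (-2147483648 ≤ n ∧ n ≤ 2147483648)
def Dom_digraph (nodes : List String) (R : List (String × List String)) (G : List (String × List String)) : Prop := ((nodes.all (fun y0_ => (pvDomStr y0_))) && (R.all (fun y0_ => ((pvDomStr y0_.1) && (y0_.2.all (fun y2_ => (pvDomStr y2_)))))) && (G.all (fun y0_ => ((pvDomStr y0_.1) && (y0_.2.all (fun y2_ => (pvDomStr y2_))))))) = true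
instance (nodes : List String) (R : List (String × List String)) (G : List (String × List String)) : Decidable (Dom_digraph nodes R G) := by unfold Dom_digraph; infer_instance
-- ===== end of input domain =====

-- B replaces the recursive `traverse` by an iterative DFS over an explicit frame stack
-- (objective: alternative decomposition, same cost); A mutates G's sets in place, B does
-- not — the equivalence proved here is about the return value.

-- ===== PORT A =====
-- Shared primitive state steps: each mirrors one block of Python lines that is textually
-- identical in A and B (push node / edge update / SCC unwind); the traversal control
-- structure around them is what differs between the two ports.
structure DgSt where
  stack : List String
  weights : PySem.Dict String Int
  F : PySem.Dict String (List String)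
deriving Repr, DecidableEq

-- number of zero-weight nodes in the universe U: termination measure only
def dgZC (U : List String) (st : DgSt) : Nat :=
  (U.filter (fun x => decide (st.weights.getD x 0 = 0))).length

-- bound on the length of any successor list: termination measure only
def dgLB (R : PySem.Dict String (List String)) : Nat :=
  (R.items.map (fun p => p.2.length)).sum

-- stack.append(node); weights[node] = len(stack); F[node] = G[node]  (B: = set(G[node]))
def dgInit (G : PySem.Dict String (List String)) (node : String) (st : DgSt) : DgSt :=
  let stack := node :: st.stack
  ⟨stack, st.weights.insert node (stack.length : Int),
   st.F.insert node (PySem.Set.ofList (G.getD node []))⟩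

-- n_x / n_y; if 0 < n_y < n_x: weights[node] = n_y; F[node].update(F[r])
def dgUpd (node r : String) (st : DgSt) : DgSt :=
  let n_x := st.weights.getD node 0
  let n_y := st.weights.getD r 0
  ⟨st.stack,
   if 0 < n_y ∧ n_y < n_x then st.weights.insert node n_y else st.weights,
   st.F.insert node (PySem.Set.update (st.F.getD node []) (st.F.getD r []))⟩

-- while True: top = stack.pop(); weights[top] = -1; F[top] = f_x; if top == node: break
def dgUnwind (node : String) (fx : List String) :
    List String → PySem.Dict String Int → PySem.Dict String (List String) → DgSt
  | [], w, F => ⟨[], w, F⟩   -- unreachable: node is always on the stack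
  | t :: rest, w, F =>
    if t = node then ⟨rest, w.insert t (-1), F.insert t fx⟩
    else dgUnwind node fx rest (w.insert t (-1)) (F.insert t fx)

-- if weights[node] == len(stack): f_x = F[node]; <unwind>
def dgFinish (node : String) (st : DgSt) : DgSt :=
  if st.weights.getD node 0 = (st.stack.length : Int) then
    dgUnwind node (st.F.getD node []) st.stack st.weights st.F
  else st

-- totality clamp used only inside dgGo; always equal to its third argument (dgClamp_trav below)
def dgClamp (U : List String) (st t : DgSt) : DgSt :=
  if dgZC U t ≤ dgZC U st then t else st

-- ---- lemmas the ports need for termination (cited in decreasing_by) ----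
lemma pv_filter_le {p q : String → Bool} :
    ∀ (U : List String), (∀ x, p x = true → q x = true) →
      (U.filter p).length ≤ (U.filter q).length := by
  intro U h
  induction U with
  | nil => simp
  | cons a t ih =>
    by_cases hp : p a = true
    · simp [List.filter_cons, hp, h a hp]; omega
    · simp only [List.filter_cons, Bool.not_eq_true] at *
      cases hq : q a <;> simp [hp, hq] <;> omega

lemma pv_filter_lt {p q : String → Bool} (x : String) :
    ∀ (U : List String), (∀ y, p y = true → q y = true) → x ∈ U →
      p x = false → q x = true →
      (U.filter p).length < (U.filter q).length := by
  intro U h hx hp hq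
  induction U with
  | nil => simp at hx
  | cons a t ih =>
    rcases List.mem_cons.1 hx with rfl | hxt
    · have ht := pv_filter_le t h
      simp only [List.filter_cons, hp, hq]
      simp
      omega
    · have ht := pv_filter_le t h
      have hi := ih hxt
      by_cases hpa : p a = true
      · simp only [List.filter_cons, hpa, h a hpa]
        simp
        omega
      · simp only [Bool.not_eq_true] at hpa
        cases hqa : q a <;> simp only [List.filter_cons, hpa, hqa] <;> simp <;> omega

lemma dgZC_mono (U : List String) {st st' : DgSt}
    (h : ∀ x, st'.weights.getD x 0 = 0 → st.weights.getD x 0 = 0) :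
    dgZC U st' ≤ dgZC U st := by
  apply pv_filter_le
  intro x hx
  simpa using h x (by simpa using hx)

lemma dgInit_w (G : PySem.Dict String (List String)) (node : String) (st : DgSt) (x : String) :
    (dgInit G node st).weights.getD x 0 =
      if x = node then ((node :: st.stack).length : Int) else st.weights.getD x 0 := by
  simp [dgInit, PySem.Dict.getD_insert]

lemma dgInit_mono (G : PySem.Dict String (List String)) (node : String) (st : DgSt) (x : String)
    (h : (dgInit G node st).weights.getD x 0 = 0) : st.weights.getD x 0 = 0 := by
  rw [dgInit_w] at h
  split at h
  · exfalso; simp only [List.length_cons] at h; omega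
  · exact h

lemma dgUpd_mono (node r : String) (st : DgSt) (x : String)
    (h : (dgUpd node r st).weights.getD x 0 = 0) : st.weights.getD x 0 = 0 := by
  simp only [dgUpd] at h
  split at h
  · rw [PySem.Dict.getD_insert] at h
    split at h
    · exfalso; omega
    · exact h
  · exact h

lemma dgUnwind_mono (node : String) (fx : List String) :
    ∀ (stack : List String) (w : PySem.Dict String Int) (F : PySem.Dict String (List String))
      (x : String), (dgUnwind node fx stack w F).weights.getD x 0 = 0 → w.getD x 0 = 0 := by
  intro stack
  induction stack with
  | nil => intro w F x h; simpa [dgUnwind] using h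
  | cons t rest ih =>
    intro w F x h
    simp only [dgUnwind] at h
    split at h
    · simp only at h
      rw [PySem.Dict.getD_insert] at h
      split at h
      · exfalso; omega
      · exact h
    · have := ih _ _ _ h
      rw [PySem.Dict.getD_insert] at this
      split at this
      · exfalso; omega
      · exact this

lemma dgFinish_mono (node : String) (st : DgSt) (x : String)
    (h : (dgFinish node st).weights.getD x 0 = 0) : st.weights.getD x 0 = 0 := by
  simp only [dgFinish] at h
  split at h
  · exact dgUnwind_mono _ _ _ _ _ _ h
  · exact h

lemma dgZC_upd_clamp_le (U : List String) (node r : String) (st t : DgSt) :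
    dgZC U (dgUpd node r (dgClamp U st t)) ≤ dgZC U st := by
  refine le_trans (dgZC_mono U (dgUpd_mono node r _)) ?_
  simp only [dgClamp]
  split
  · assumption
  · exact le_refl _

lemma dgZC_upd_le (U : List String) (node r : String) (st : DgSt) :
    dgZC U (dgUpd node r st) ≤ dgZC U st :=
  dgZC_mono U (dgUpd_mono node r st)

lemma dgZC_finish_le (U : List String) (node : String) (st : DgSt) :
    dgZC U (dgFinish node st) ≤ dgZC U st :=
  dgZC_mono U (dgFinish_mono node st)

lemma dgZC_init_lt (U : List String) (G : PySem.Dict String (List String)) (node : String)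
    (st : DgSt) (hU : node ∈ U) (hz : st.weights.getD node 0 = 0) :
    dgZC U (dgInit G node st) < dgZC U st := by
  apply pv_filter_lt node U _ hU
  · simp [dgInit_w]; omega
  · simp [hz]
  · intro y hy
    simp only [decide_eq_true_eq] at *
    exact dgInit_mono G node st y hy

lemma dgLB_le (R : PySem.Dict String (List String)) (node : String) :
    (R.getD node []).length ≤ dgLB R := by
  rcases h : R.get? node with _ | v
  · rw [PySem.Dict.getD_eq_get?_getD, h]; simp
  · rw [PySem.Dict.getD_eq_get?_getD, h, Option.getD_some]
    have hm := PySem.Dict.mem_items_of_get?_eq_some R h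
    have : v.length ∈ R.items.map (fun p => p.2.length) :=
      List.mem_map.2 ⟨(node, v), hm, rfl⟩
    exact List.single_le_sum (by intro x _; omega) _ this

lemma pv_meas1 (A B L len : Nat) (h : A < B) (hl : len ≤ L) :
    A * (L + 2) + len + 1 < B * (L + 2) := by
  have := Nat.mul_le_mul_right (L + 2) (Nat.succ_le_of_lt h)
  rw [Nat.succ_mul] at this
  omega

lemma pv_meas3 (A B L len : Nat) (h : A ≤ B) :
    A * (L + 2) + len + 1 < B * (L + 2) + (len + 1) + 1 := by
  have := Nat.mul_le_mul_right (L + 2) h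
  omega

-- A's recursive traverse: dgTrav is the body of `def traverse(node)`, dgGo its
-- `for r in R[node]` loop.  The dite guard and the dgClamp wrapper only make the
-- recursion total; at every call site A performs they are the identity.
mutual
def dgTrav (R G : PySem.Dict String (List String)) (U : List String) (node : String)
    (st : DgSt) : DgSt :=
  if h : node ∈ U ∧ st.weights.getD node 0 = 0 then
    dgFinish node (dgGo R G U node (R.getD node []) (dgInit G node st))
  else st
termination_by dgZC U st * (dgLB R + 2)
decreasing_by
  exact pv_meas1 _ _ _ _ (dgZC_init_lt U G node st h.1 h.2) (dgLB_le R node)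

def dgGo (R G : PySem.Dict String (List String)) (U : List String) (node : String) :
    List String → DgSt → DgSt
  | [], st => st
  | r :: rs, st =>
    dgGo R G U node rs
      (dgUpd node r
        (dgClamp U st (if st.weights.getD r 0 = 0 then dgTrav R G U r st else st)))
termination_by rs st => dgZC U st * (dgLB R + 2) + rs.length + 1
decreasing_by
  · simp only [List.length_cons]; omega
  · simp only [List.length_cons]
    exact pv_meas3 _ _ _ _ (dgZC_upd_clamp_le U node r st _)
end

def digraph (nodes : List String) (R : List (String × List String))
    (G : List (String × List String)) : List (String × List String) :=
  let RD := PySem.Dict.mk R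
  let GD := PySem.Dict.mk G
  let U := nodes ++ R.flatMap (fun p => p.2)
  let w0 := nodes.foldl (fun w n => w.insert n 0) (PySem.Dict.empty : PySem.Dict String Int)
  let st0 : DgSt := ⟨[], w0, PySem.Dict.empty⟩
  (nodes.foldl (fun st x => if st.weights.getD x 0 = 0 then dgTrav RD GD U x st else st)
    st0).F.items

-- ===== PORT B =====
-- B's while loop over the explicit frame stack; a frame (node, rs) holds the successors
-- of node not yet consumed (Source B keeps an index into R[node]; the suffix is the same data).
def dgRun (R G : PySem.Dict String (List String)) (U : List String) :
    List (String × List String) → DgSt → DgSt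
  | [], _st => by exact _st
  | (node, []) :: fs, st => dgRun R G U fs (dgFinish node st)
  | (node, r :: rs) :: fs, st =>
    if h : st.weights.getD r 0 = 0 ∧ r ∈ U then
      dgRun R G U ((r, R.getD r []) :: (node, r :: rs) :: fs) (dgInit G r st)
    else
      dgRun R G U ((node, rs) :: fs) (dgUpd node r st)
termination_by frames st =>
  dgZC U st * (dgLB R + 2) + (frames.map (fun f => f.2.length)).sum + frames.length
decreasing_by
  · have h3 := Nat.mul_le_mul_right (dgLB R + 2) (dgZC_finish_le U node st)
    simp only [List.map_cons, List.sum_cons, List.length_cons]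
    omega
  · have h1 := dgZC_init_lt U G r st h.2 h.1
    have h2 := dgLB_le R r
    have h3 := Nat.mul_le_mul_right (dgLB R + 2) (Nat.succ_le_of_lt h1)
    rw [Nat.succ_mul] at h3
    simp only [List.map_cons, List.sum_cons, List.length_cons]
    omega
  · have h3 := Nat.mul_le_mul_right (dgLB R + 2) (dgZC_upd_le U node r st)
    simp only [List.map_cons, List.sum_cons, List.length_cons]
    omega

def digraph_alt (nodes : List String) (R : List (String × List String))
    (G : List (String × List String)) : List (String × List String) :=
  let RD := PySem.Dict.mk R
  let GD := PySem.Dict.mk G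
  let U := nodes ++ R.flatMap (fun p => p.2)
  let w0 := nodes.foldl (fun w n => w.insert n 0) (PySem.Dict.empty : PySem.Dict String Int)
  let st0 : DgSt := ⟨[], w0, PySem.Dict.empty⟩
  (nodes.foldl
    (fun st x =>
      if st.weights.getD x 0 = 0 then
        dgRun RD GD U [(x, RD.getD x [])] (dgInit GD x st)
      else st)
    st0).F.items

-- ===== PRECONDITION & SPEC =====
-- Pre_ is exactly A's no-KeyError domain: every node must be a key of R and of G
-- (traverse reads R[node], G[node]) and every successor must be in nodes (weights[r]
-- is read, and weights has exactly the nodes as keys).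
def Pre_digraph (nodes : List String) (R : List (String × List String))
    (G : List (String × List String)) : Prop :=
  ∀ x ∈ nodes, x ∈ R.map Prod.fst ∧ x ∈ G.map Prod.fst ∧
    ∀ r ∈ (PySem.Dict.mk R).getD x [], r ∈ nodes
instance (nodes : List String) (R : List (String × List String))
    (G : List (String × List String)) : Decidable (Pre_digraph nodes R G) := by
  unfold Pre_digraph; infer_instance

def pvWitness_digraph : List String × (List (String × List String)) × (List (String × List String)) :=
  (["a", "b"], [("a", ["b"]), ("b", ["a"])], [("a", ["x"]), ("b", [])])

def Spec_digraph (nodes : List String) (R : List (String × List String))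
    (G : List (String × List String)) (out : List (String × List String)) : Prop :=
  out = digraph_alt nodes R G
instance (nodes : List String) (R : List (String × List String))
    (G : List (String × List String)) (out : List (String × List String)) :
    Decidable (Spec_digraph nodes R G out) := by
  unfold Spec_digraph; infer_instance

-- ===== CLAIM (what is proved, stated in full; the proofs are below) =====
def Claim_equal_digraph : Prop := ∀ (nodes : List String) (R : List (String × List String)) (G : List (String × List String)), Dom_digraph nodes R G → Pre_digraph nodes R G → Spec_digraph nodes R G (digraph nodes R G)

-- ===== LEMMAS AND PROOFS =====

-- the dgTrav/dgGo recursion never turns a nonzero weight back into zero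
lemma dg_mono_all (R G : PySem.Dict String (List String)) (U : List String) :
    ∀ N : Nat,
      (∀ node st, dgZC U st * (dgLB R + 2) < N → ∀ x,
          (dgTrav R G U node st).weights.getD x 0 = 0 → st.weights.getD x 0 = 0) ∧
      (∀ node rs st, dgZC U st * (dgLB R + 2) + rs.length + 1 < N → ∀ x,
          (dgGo R G U node rs st).weights.getD x 0 = 0 → st.weights.getD x 0 = 0) := by
  intro N
  induction N with
  | zero => exact ⟨fun _ _ h => absurd h (by omega), fun _ _ _ h => absurd h (by omega)⟩
  | succ N ih =>
    constructor
    · intro node st hm x hx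
      rw [dgTrav] at hx
      split at hx
      · rename_i hguard
        have h1 := dgFinish_mono _ _ _ hx
        have hlt : dgZC U (dgInit G node st) * (dgLB R + 2) + (R.getD node []).length + 1
            < dgZC U st * (dgLB R + 2) :=
          pv_meas1 _ _ _ _ (dgZC_init_lt U G node st hguard.1 hguard.2) (dgLB_le R node)
        have h2 := (ih).2 node (R.getD node []) (dgInit G node st) (by omega) x h1
        exact dgInit_mono G node st x h2
      · exact hx
    · intro node rs st hm x hx
      cases rs with
      | nil => rw [dgGo] at hx; exact hx
      | cons r rs' =>
        rw [dgGo] at hx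
        have hlt : dgZC U (dgUpd node r (dgClamp U st
            (if st.weights.getD r 0 = 0 then dgTrav R G U r st else st))) * (dgLB R + 2)
            + rs'.length + 1
            < dgZC U st * (dgLB R + 2) + (r :: rs').length + 1 := by
          simp only [List.length_cons]
          exact pv_meas3 _ _ _ _ (dgZC_upd_clamp_le U node r st _)
        simp only [List.length_cons] at hm hlt
        have h1 := (ih).2 node rs' _ (by omega) x hx
        have h2 := dgUpd_mono node r _ x h1
        by_cases hz : st.weights.getD r 0 = 0
        · rw [if_pos hz, dgClamp] at h2
          split at h2
          · exact (ih).1 r st (by omega) x h2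
          · exact h2
        · rw [if_neg hz, dgClamp] at h2
          split at h2 <;> exact h2

lemma dgTrav_mono (R G : PySem.Dict String (List String)) (U : List String)
    (node : String) (st : DgSt) (x : String)
    (h : (dgTrav R G U node st).weights.getD x 0 = 0) : st.weights.getD x 0 = 0 :=
  (dg_mono_all R G U (dgZC U st * (dgLB R + 2) + 1)).1 node st (by omega) x h

lemma dgGo_mono (R G : PySem.Dict String (List String)) (U : List String)
    (node : String) (rs : List String) (st : DgSt) (x : String)
    (h : (dgGo R G U node rs st).weights.getD x 0 = 0) : st.weights.getD x 0 = 0 :=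
  (dg_mono_all R G U (dgZC U st * (dgLB R + 2) + rs.length + 2)).2 node rs st (by omega) x h

lemma dgTrav_zc_le (R G : PySem.Dict String (List String)) (U : List String)
    (node : String) (st : DgSt) : dgZC U (dgTrav R G U node st) ≤ dgZC U st :=
  dgZC_mono U (dgTrav_mono R G U node st)

-- after a guarded traverse of r, weights[r] is never 0 again
lemma dgTrav_nonzero (R G : PySem.Dict String (List String)) (U : List String)
    (r : String) (st : DgSt) (hU : r ∈ U) (hz : st.weights.getD r 0 = 0) :
    ¬ (dgTrav R G U r st).weights.getD r 0 = 0 := by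
  intro h
  rw [dgTrav, dif_pos ⟨hU, hz⟩] at h
  have h1 := dgFinish_mono _ _ _ h
  have h2 := dgGo_mono R G U r (R.getD r []) _ r h1
  rw [dgInit_w, if_pos rfl] at h2
  simp only [List.length_cons] at h2
  omega

lemma dgClamp_trav (R G : PySem.Dict String (List String)) (U : List String)
    (r : String) (st : DgSt) :
    dgClamp U st (dgTrav R G U r st) = dgTrav R G U r st := by
  simp [dgClamp, dgTrav_zc_le]

lemma dgClamp_self (U : List String) (st : DgSt) : dgClamp U st st = st := by
  simp [dgClamp]

-- dgGo's step with the clamp removed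
lemma dgGo_cons (R G : PySem.Dict String (List String)) (U : List String)
    (node r : String) (rs : List String) (st : DgSt) :
    dgGo R G U node (r :: rs) st =
      dgGo R G U node rs
        (dgUpd node r (if st.weights.getD r 0 = 0 then dgTrav R G U r st else st)) := by
  rw [dgGo]
  by_cases h : st.weights.getD r 0 = 0 <;>
    simp [h, dgClamp_trav, dgClamp_self]

-- the frame machine simulates one recursive call:
-- running with (node, rs) on top finishes node's loop over rs, then finishes node
lemma dgRun_go (R G : PySem.Dict String (List String)) (U : List String) :
    ∀ (N : Nat) (node : String) (rs : List String) (fs : List (String × List String))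
      (st : DgSt),
      dgZC U st * (dgLB R + 2) + (((node, rs) :: fs).map (fun f => f.2.length)).sum +
        ((node, rs) :: fs).length < N →
      dgRun R G U ((node, rs) :: fs) st =
        dgRun R G U fs (dgFinish node (dgGo R G U node rs st)) := by
  intro N
  induction N with
  | zero => intro node rs fs st h; exact absurd h (by omega)
  | succ N ih =>
    intro node rs fs st hm
    cases rs with
    | nil => rw [dgRun, dgGo]
    | cons r rs' =>
      simp only [List.map_cons, List.sum_cons, List.length_cons] at hm
      rw [dgRun]
      split
      · rename_i h
        -- push a child frame for r, recursively finish it, then resume node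
        have hlt1 : dgZC U (dgInit G r st) * (dgLB R + 2) +
            (((r, R.getD r []) :: (node, r :: rs') :: fs).map (fun f => f.2.length)).sum +
            ((r, R.getD r []) :: (node, r :: rs') :: fs).length < N := by
          have h1 := dgZC_init_lt U G r st h.2 h.1
          have h2 := dgLB_le R r
          have h3 := Nat.mul_le_mul_right (dgLB R + 2) (Nat.succ_le_of_lt h1)
          rw [Nat.succ_mul] at h3
          simp only [List.map_cons, List.sum_cons, List.length_cons]
          omega
        rw [ih r (R.getD r []) ((node, r :: rs') :: fs) (dgInit G r st) hlt1]
        have htrav : dgFinish r (dgGo R G U r (R.getD r []) (dgInit G r st)) =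
            dgTrav R G U r st := by
          rw [dgTrav, dif_pos ⟨h.2, h.1⟩]
        rw [htrav]
        rw [dgRun]
        rw [dif_neg (by
          intro hc
          exact dgTrav_nonzero R G U r st h.2 h.1 hc.1)]
        have hzc := dgTrav_zc_le R G U r st
        have hzc2 := dgZC_upd_le U node r (dgTrav R G U r st)
        have hlt2 : dgZC U (dgUpd node r (dgTrav R G U r st)) * (dgLB R + 2) +
            (((node, rs') :: fs).map (fun f => f.2.length)).sum +
            ((node, rs') :: fs).length < N := by
          simp only [List.map_cons, List.sum_cons, List.length_cons]
          have := Nat.mul_le_mul_right (dgLB R + 2) (le_trans hzc2 hzc)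
          omega
        rw [ih node rs' fs (dgUpd node r (dgTrav R G U r st)) hlt2]
        rw [dgGo_cons, if_pos h.1]
      · rename_i h
        have hlt2 : dgZC U (dgUpd node r st) * (dgLB R + 2) +
            (((node, rs') :: fs).map (fun f => f.2.length)).sum +
            ((node, rs') :: fs).length < N := by
          simp only [List.map_cons, List.sum_cons, List.length_cons]
          have := Nat.mul_le_mul_right (dgLB R + 2) (dgZC_upd_le U node r st)
          omega
        rw [ih node rs' fs (dgUpd node r st) hlt2]
        rw [dgGo_cons]
        by_cases hz : st.weights.getD r 0 = 0
        · have hU : r ∉ U := fun hu => h ⟨hz, hu⟩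
          rw [if_pos hz, dgTrav, dif_neg (fun hc => hU hc.1)]
        · rw [if_neg hz]

-- the two outer-loop step functions agree on every node of the universe
lemma dg_step_eq (R G : PySem.Dict String (List String)) (U : List String)
    (x : String) (st : DgSt) (hxU : x ∈ U) :
    (if st.weights.getD x 0 = 0 then dgTrav R G U x st else st) =
    (if st.weights.getD x 0 = 0 then dgRun R G U [(x, R.getD x [])] (dgInit G x st)
     else st) := by
  by_cases hz : st.weights.getD x 0 = 0
  · rw [if_pos hz, if_pos hz]
    rw [dgRun_go R G U
      (dgZC U (dgInit G x st) * (dgLB R + 2) + (R.getD x []).length + 2) x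
      (R.getD x []) [] (dgInit G x st) (by simp)]
    rw [dgRun]
    rw [dgTrav, dif_pos ⟨hxU, hz⟩]
  · rw [if_neg hz, if_neg hz]

lemma dg_fold_eq (R G : PySem.Dict String (List String)) (U : List String) :
    ∀ (l : List String) (st : DgSt), (∀ x ∈ l, x ∈ U) →
      l.foldl (fun st x => if st.weights.getD x 0 = 0 then dgTrav R G U x st else st) st =
      l.foldl (fun st x => if st.weights.getD x 0 = 0 then
        dgRun R G U [(x, R.getD x [])] (dgInit G x st) else st) st := by
  intro l
  induction l with
  | nil => intro st _; rfl
  | cons a t ih =>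
    intro st h
    simp only [List.foldl_cons]
    rw [dg_step_eq R G U a st (h a (List.mem_cons_self))]
    exact ih _ (fun x hx => h x (List.mem_cons_of_mem a hx))

-- ===== VERDICT (by name: the statement is the Claim_ definition above) =====
theorem digraph_spec : Claim_equal_digraph := by
  intro nodes R G _hdom _hpre
  unfold Spec_digraph digraph digraph_alt
  dsimp only
  exact congrArg _ (congrArg _ (dg_fold_eq _ _ _ nodes _
    (fun x hx => List.mem_append_left _ hx)))
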